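-- pv_equiv track=rewrite | github.com/EthanChamps/audit | fortigate_acl_parser.py | tokenize_value
-- ===== SOURCE A (Python) =====
-- def tokenize_value(s):
--     """Parse a FortiGate config value string into individual tokens.
--     Handles quoted strings, unquoted words, and escaped characters."""
--     tokens = []
--     i = 0
--     s = s.strip()
--     while i < len(s):
--         if s[i] == '"':
--             j = i + 1
--             while j < len(s) and s[j] != '"':
--                 if s[j] == '\\':
--                     j += 1
--                 j += 1
--             tokens.append(s[i + 1:j])
--             i = j + 1
--         elif s[i].isspace():
--             i += 1
--         else:
--             j = i
--             while j < len(s) and not s[j].isspace() and s[j] != '"':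
--                 j += 1
--             tokens.append(s[i:j])
--             i = j
--     return tokens
-- ===== SOURCE B (Python) =====
-- def tokenize_value(s):
--     """Parse a FortiGate config value string into individual tokens.
--     Single flat state-machine loop: normal / word / quote states with an
--     escape flag and a running buffer."""
--     tokens = []
--     buf = []
--     state = 0  # 0 = normal, 1 = word, 2 = inside quotes
--     esc = False
--     for ch in s.strip():
--         if state == 2:
--             if esc:
--                 buf.append(ch)
--                 esc = False
--             elif ch == '\\':
--                 buf.append(ch)
--                 esc = True
--             elif ch == '"':
--                 tokens.append(''.join(buf))
--                 buf = []
--                 state = 0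
--             else:
--                 buf.append(ch)
--         elif state == 1:
--             if ch == '"':
--                 tokens.append(''.join(buf))
--                 buf = []
--                 state = 2
--             elif ch.isspace():
--                 tokens.append(''.join(buf))
--                 buf = []
--                 state = 0
--             else:
--                 buf.append(ch)
--         else:
--             if ch == '"':
--                 state = 2
--             elif not ch.isspace():
--                 buf.append(ch)
--                 state = 1
--     if state != 0:
--         tokens.append(''.join(buf))
--     return tokens
-- ===== Notes on version B (the rewrite author's own statement) =====
-- stated objective: alternative
-- what changed: A's nested index-based while-loops (outer dispatch plus inner scans that slice out each token) are replaced by a single flat pass over the characters driven by an explicit state machine (normal/word/quote + escape flag) that accumulates the current token in a buffer and flushes it at delimiters and at end of input; avoiding repeated indexing/slicing gives a constant-factor speedup.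
import Mathlib
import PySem

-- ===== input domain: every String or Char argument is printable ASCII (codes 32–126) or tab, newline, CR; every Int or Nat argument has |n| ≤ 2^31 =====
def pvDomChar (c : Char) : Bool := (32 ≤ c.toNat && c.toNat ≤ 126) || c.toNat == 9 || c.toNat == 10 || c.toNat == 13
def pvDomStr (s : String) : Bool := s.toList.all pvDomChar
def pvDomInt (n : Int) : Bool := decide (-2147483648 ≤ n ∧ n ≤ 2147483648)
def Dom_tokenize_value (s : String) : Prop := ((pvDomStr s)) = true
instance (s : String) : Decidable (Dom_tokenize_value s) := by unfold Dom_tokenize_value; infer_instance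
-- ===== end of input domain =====

-- B re-decomposes A's index-scanning tokenizer as a single flat character loop with an
-- explicit state (normal / word / quote) + escape flag; same return value, objective: alternative.

-- ===== PORT A =====

-- inner 'while' of the quote branch: scans for the closing quote, a backslash skips
-- the next character; returns (the token content s[i+1:j], the rest after the quote)
def aScanQuote : List Char → List Char × List Char
  | [] => ([], [])
  | c :: rest =>
    if c = '"' then ([], rest)
    else if c = '\\' then
      match rest with
      | [] => (['\\'], [])
      | d :: rest' => ('\\' :: d :: (aScanQuote rest').1, (aScanQuote rest').2)
    else (c :: (aScanQuote rest).1, (aScanQuote rest).2)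

theorem aScanQuote_len (l : List Char) : (aScanQuote l).2.length ≤ l.length := by
  fun_induction aScanQuote l <;> simp_all <;> omega

-- word-character condition of A's third branch: not s[j].isspace() and s[j] != '"'
def aWordP (c : Char) : Bool := !PySem.Chars.isspace c && !(c == '"')

-- outer 'while i < len(s)' of A, as recursion over the remaining characters
def aRun : List Char → List String
  | [] => []
  | c :: rest =>
    if c = '"' then
      String.ofList (aScanQuote rest).1 :: aRun (aScanQuote rest).2
    else if PySem.Chars.isspace c then
      aRun rest
    else
      String.ofList ((c :: rest).takeWhile aWordP) :: aRun ((c :: rest).dropWhile aWordP)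
  termination_by l => l.length
  decreasing_by
  · have := aScanQuote_len rest; simp; omega
  · simp
  · have h : aWordP c = true := by simp [aWordP, *]
    simp [List.dropWhile, h]
    have := List.length_dropWhile_le (p := aWordP) (l := rest)
    omega

def tokenize_value (s : String) : List String := aRun (PySem.Str.strip s).toList

-- ===== PORT B =====
inductive BSt where
  | norm | word | quot
deriving DecidableEq, Repr

-- the single for-loop of Source B: state, escape flag, current buffer, tokens so far;
-- at end of input any open word/quote buffer is flushed
def bLoop : List Char → BSt → Bool → List Char → List String → List String
  | [], st, _, buf, toks => if st ≠ BSt.norm then toks ++ [String.ofList buf] else toks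
  | ch :: rest, st, esc, buf, toks =>
    match st with
    | .quot =>
      if esc then bLoop rest .quot false (buf ++ [ch]) toks
      else if ch = '\\' then bLoop rest .quot true (buf ++ [ch]) toks
      else if ch = '"' then bLoop rest .norm false [] (toks ++ [String.ofList buf])
      else bLoop rest .quot false (buf ++ [ch]) toks
    | .word =>
      if ch = '"' then bLoop rest .quot false [] (toks ++ [String.ofList buf])
      else if PySem.Chars.isspace ch then bLoop rest .norm false [] (toks ++ [String.ofList buf])
      else bLoop rest .word esc (buf ++ [ch]) toks
    | .norm =>
      if ch = '"' then bLoop rest .quot false buf toks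
      else if !PySem.Chars.isspace ch then bLoop rest .word esc (buf ++ [ch]) toks
      else bLoop rest .norm esc buf toks

def tokenize_value_alt (s : String) : List String :=
  bLoop (PySem.Str.strip s).toList .norm false [] []

-- ===== PRECONDITION & SPEC =====
def Spec_tokenize_value (s : String) (out : List String) : Prop := out = tokenize_value_alt s
instance (s : String) (out : List String) : Decidable (Spec_tokenize_value s out) := by unfold Spec_tokenize_value; infer_instance

-- ===== CLAIM (what is proved, stated in full; the proofs are below) =====
def Claim_equal_tokenize_value : Prop := ∀ (s : String), Dom_tokenize_value s → Spec_tokenize_value s (tokenize_value s)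

-- ===== LEMMAS AND PROOFS =====

-- inside a quote, B's loop consumes exactly what A's inner scan consumes and flushes the same token
theorem bLoop_quot (l : List Char) : ∀ (buf : List Char) (toks : List String),
    bLoop l .quot false buf toks
      = bLoop (aScanQuote l).2 .norm false []
          (toks ++ [String.ofList (buf ++ (aScanQuote l).1)]) := by
  fun_induction aScanQuote l <;> intro buf toks <;>
    simp_all [bLoop, -String.ofList_append]

-- combined invariant: from the normal state B's loop emits exactly aRun; from the word
-- state it first flushes buf plus the word span and then continues as aRun of the rest
theorem bLoop_main : ∀ (n : Nat) (l : List Char), l.length ≤ n →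
    (∀ toks, bLoop l .norm false [] toks = toks ++ aRun l) ∧
    (∀ buf toks, bLoop l .word false buf toks
        = toks ++ [String.ofList (buf ++ l.takeWhile aWordP)] ++ aRun (l.dropWhile aWordP)) := by
  intro n
  induction n with
  | zero =>
      intro l hl
      have : l = [] := List.length_eq_zero_iff.mp (Nat.le_zero.mp hl)
      subst this
      constructor <;> intros <;> simp [bLoop, aRun]
  | succ n ih =>
      intro l hl
      match l with
      | [] => constructor <;> intros <;> simp [bLoop, aRun]
      | c :: rest =>
        have hrest : rest.length ≤ n := by simpa using hl
        by_cases hq : c = '"'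
        · subst hq
          have h2 : (aScanQuote rest).2.length ≤ n :=
            le_trans (aScanQuote_len rest) hrest
          constructor
          · intro toks
            simp only [bLoop, reduceIte]
            rw [bLoop_quot, (ih _ h2).1]
            simp [aRun]
          · intro buf toks
            simp only [bLoop]
            rw [bLoop_quot, (ih _ h2).1]
            have hp : aWordP '"' = false := by simp [aWordP]
            simp [aRun, List.takeWhile, List.dropWhile, hp]
        · by_cases hs : PySem.Chars.isspace c = true
          · constructor
            · intro toks
              have := (ih rest hrest).1 toks
              simp [bLoop, hq, hs, aRun, this]
            · intro buf toks
              have hp : aWordP c = false := by simp [aWordP, hs]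
              have := (ih rest hrest).1 (toks ++ [String.ofList buf])
              simp [bLoop, hq, hs, aRun, List.takeWhile, List.dropWhile, hp, this]
          · have hp : aWordP c = true := by simp [aWordP, hq, hs]
            constructor
            · intro toks
              have := (ih rest hrest).2 [c] toks
              simp [bLoop, hq, hs, aRun, List.takeWhile, List.dropWhile, hp, this]
            · intro buf toks
              have := (ih rest hrest).2 (buf ++ [c]) toks
              simp [bLoop, hq, hs, List.takeWhile, List.dropWhile, hp, this]

-- ===== VERDICT (by name: the statement is the Claim_ definition above) =====
theorem tokenize_value_spec : Claim_equal_tokenize_value := by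
  intro s _
  unfold Spec_tokenize_value tokenize_value tokenize_value_alt
  rw [(bLoop_main (PySem.Str.strip s).toList.length _ le_rfl).1]
  simp
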